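-- pv_equiv track=rewrite | github.com/vmred/codewars | kyu6/Next polydivisible number/solution.py | find_polydivisible
-- ===== SOURCE A (Python) =====
-- def find_polydivisible(base=10):
--     numbers = []
--     previous = []
--     for i in range(1, base):
--         previous.append(i)
--     new = []
--     digits = 2
--     while not previous == []:
--         numbers = numbers + previous
--         for i in range(0, len(previous)):
--             for j in range(0, base):
--                 number = previous[i] * base + j
--                 if number % digits == 0:
--                     new.append(number)
--         previous = new
--         new = []
--         digits = digits + 1
--     return numbers
-- ===== SOURCE B (Python) =====
-- def find_polydivisible(base=10):
--     results = []
--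
--     def helper(prefix, length):
--         results.append(prefix)
--         for j in range(base):
--             n = prefix * base + j
--             if n % length == 0:
--                 helper(n, length + 1)
--
--     for i in range(1, base):
--         helper(i, 2)
--     return sorted(results)
-- ===== Notes on version B (the rewrite author's own statement) =====
-- stated objective: alternative
-- what changed: A's level-by-level BFS with nested index loops rebuilding each level is replaced by a recursive DFS from each starting digit that collects all polydivisible extensions, followed by one sort to restore numeric order.
import Mathlib
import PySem

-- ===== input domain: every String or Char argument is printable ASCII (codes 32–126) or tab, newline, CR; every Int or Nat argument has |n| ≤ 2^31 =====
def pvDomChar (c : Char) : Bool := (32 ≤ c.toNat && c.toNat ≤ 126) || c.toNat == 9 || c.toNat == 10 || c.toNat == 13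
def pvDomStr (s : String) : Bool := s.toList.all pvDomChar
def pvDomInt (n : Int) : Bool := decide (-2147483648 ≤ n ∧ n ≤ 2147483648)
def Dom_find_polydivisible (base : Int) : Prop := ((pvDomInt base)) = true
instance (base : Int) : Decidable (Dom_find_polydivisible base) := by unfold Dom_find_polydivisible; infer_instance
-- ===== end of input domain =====

-- B replaces A's level-by-level BFS (rebuilding each level with nested index loops) by a recursive
-- DFS from each starting digit followed by one sort; objective: alternative decomposition.
-- The Nat fuel in both ports is a Lean-only termination artifact (Python iterates/recurses unboundedly);
-- agreement is proved for every fuel value, and both ports use the same constant.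

-- ===== PORT A =====
-- inner 'for i in range(0, len(previous)): for j in range(0, base): …' building `new`
def aInner (base digits : Int) (previous : List Int) : List Int :=
  (PySem.List.pyRange 0 (previous.length : Int) 1).foldl (fun new i =>
    (PySem.List.pyRange 0 base 1).foldl (fun new j =>
      let number := (PySem.List.pyGetD previous i 0) * base + j
      if PySem.Int.mod number digits == 0 then new ++ [number] else new) new) []

-- the 'while not previous == []' loop
def aLoop (base : Int) : Nat → List Int → List Int → Int → List Int
  | 0, numbers, _, _ => numbers
  | f+1, numbers, previous, digits =>
    if previous == [] then numbers
    else aLoop base f (numbers ++ previous) (aInner base digits previous) (digits + 1)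

def find_polydivisible (base : Int) : List Int :=
  aLoop base (2^64) [] (PySem.List.pyRange 1 base 1) 2

-- ===== PORT B =====
-- helper(prefix, length): emit prefix, then recurse on each divisible one-digit extension
def bDfs (base : Int) : Nat → Int → Int → List Int
  | 0, _, _ => []
  | f+1, pre, length =>
    pre :: (PySem.List.pyRange 0 base 1).flatMap (fun j =>
      let n := pre * base + j
      if PySem.Int.mod n length == 0 then bDfs base f n (length + 1) else [])

def find_polydivisible_alt (base : Int) : List Int :=
  PySem.List.sorted
    ((PySem.List.pyRange 1 base 1).flatMap (fun i => bDfs base (2^64) i 2))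
    (fun x => x) false

-- ===== PRECONDITION & SPEC =====
def Spec_find_polydivisible (base : Int) (out : List Int) : Prop := out = find_polydivisible_alt base
instance (base : Int) (out : List Int) : Decidable (Spec_find_polydivisible base out) := by unfold Spec_find_polydivisible; infer_instance

-- ===== CLAIM (what is proved, stated in full; the proofs are below) =====
def Claim_equal_find_polydivisible : Prop := ∀ (base : Int), Dom_find_polydivisible base → Spec_find_polydivisible base (find_polydivisible base)

-- ===== LEMMAS AND PROOFS =====

-- the children of a prefix p at a given digit count, in increasing order
def pvKids (base digits p : Int) : List Int :=
  ((PySem.List.pyRange 0 base 1).filter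
    (fun j => PySem.Int.mod (p * base + j) digits == 0)).map (fun j => p * base + j)

theorem aInner_eq (base digits : Int) (previous : List Int) :
    aInner base digits previous = previous.flatMap (pvKids base digits) := by
  unfold aInner
  rw [PySem.List.foldl_pyRange_zero_pyGetD' previous 0
    (fun acc p => (PySem.List.pyRange 0 base 1).foldl (fun new j =>
      let number := p * base + j
      if PySem.Int.mod number digits == 0 then new ++ [number] else new) acc) []]
  have h : ∀ (acc : List Int), ∀ p ∈ previous,
      (PySem.List.pyRange 0 base 1).foldl (fun new j =>
        let number := p * base + j
        if PySem.Int.mod number digits == 0 then new ++ [number] else new) acc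
      = acc ++ pvKids base digits p := by
    intro acc p _
    simpa [pvKids] using PySem.List.foldl_append_if
      (p := fun j => PySem.Int.mod (p * base + j) digits == 0)
      (f := fun j => p * base + j)
      (l := PySem.List.pyRange 0 base 1) (acc := acc)
  rw [PySem.List.foldl_congr_mem previous _ (fun acc p => acc ++ pvKids base digits p) [] h]
  simpa using PySem.List.foldl_append_eq_flatMap (pvKids base digits) previous []

theorem flatMap_ite_filter {α β : Type} (l : List α) (p : α → Bool) (g : α → List β) :
    l.flatMap (fun x => if p x then g x else []) = (l.filter p).flatMap g := by
  induction l with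
  | nil => simp
  | cons x xs ih =>
    simp only [List.flatMap_cons, List.filter_cons, ih]
    by_cases h : p x <;> simp [h]

theorem bDfs_succ (base : Int) (f : Nat) (p d : Int) :
    bDfs base (f+1) p d
      = p :: (pvKids base d p).flatMap (fun n => bDfs base f n (d + 1)) := by
  show p :: _ = _
  rw [flatMap_ite_filter (PySem.List.pyRange 0 base 1)
      (fun j => PySem.Int.mod (p * base + j) d == 0)
      (fun j => bDfs base f (p * base + j) (d + 1))]
  simp [pvKids, List.flatMap_map]

theorem aLoop_acc (base : Int) :
    ∀ (f : Nat) (numbers previous : List Int) (digits : Int),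
      aLoop base f numbers previous digits = numbers ++ aLoop base f [] previous digits := by
  intro f
  induction f with
  | zero => intro numbers previous digits; simp [aLoop]
  | succ f ih =>
    intro numbers previous digits
    by_cases h : previous = []
    · simp [aLoop, h]
    · rw [show aLoop base (f+1) numbers previous digits = aLoop base f (numbers ++ previous) (aInner base digits previous) (digits+1) from by simp [aLoop, h],
          show aLoop base (f+1) [] previous digits = aLoop base f previous (aInner base digits previous) (digits+1) from by simp [aLoop, h],
          ih (numbers ++ previous), ih previous, List.append_assoc]

theorem cons_flatMap_perm {α : Type} (xs : List α) (g : α → List α) :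
    (xs ++ xs.flatMap g).Perm (xs.flatMap (fun x => x :: g x)) := by
  induction xs with
  | nil => simp
  | cons x xs ih =>
    simp only [List.cons_append, List.flatMap_cons]
    refine List.Perm.cons x ?_
    have p1 : (xs ++ (g x ++ xs.flatMap g)).Perm (g x ++ (xs ++ xs.flatMap g)) := by
      rw [← List.append_assoc, ← List.append_assoc]
      exact (List.perm_append_comm).append_right _
    exact p1.trans (ih.append_left _)

theorem aLoop_perm_dfs (base : Int) :
    ∀ (f : Nat) (previous : List Int) (digits : Int),
      (aLoop base f [] previous digits).Perm
        (previous.flatMap (fun p => bDfs base f p digits)) := by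
  intro f
  induction f with
  | zero => intro previous digits; simp [aLoop, bDfs]
  | succ f ih =>
    intro previous digits
    by_cases h : previous = []
    · simp [aLoop, h]
    · rw [show aLoop base (f+1) [] previous digits = aLoop base f previous (aInner base digits previous) (digits+1) from by simp [aLoop, h],
          aLoop_acc, aInner_eq]
      have h1 : ((previous.flatMap (pvKids base digits)).flatMap (fun p => bDfs base f p (digits+1)))
          = previous.flatMap (fun p => (pvKids base digits p).flatMap (fun n => bDfs base f n (digits+1))) :=
        List.flatMap_assoc
      have step1 : (previous ++ aLoop base f [] (previous.flatMap (pvKids base digits)) (digits+1)).Perm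
          (previous ++ previous.flatMap (fun p => (pvKids base digits p).flatMap (fun n => bDfs base f n (digits+1)))) := by
        rw [← h1]; exact (ih _ _).append_left _
      refine step1.trans ?_
      simp only [bDfs_succ]
      exact cons_flatMap_perm _ _

theorem mem_pvKids {base digits p c : Int} (hc : c ∈ pvKids base digits p) :
    ∃ j, 0 ≤ j ∧ j < base ∧ c = p * base + j := by
  simp only [pvKids, List.mem_map, List.mem_filter] at hc
  obtain ⟨j, ⟨hj, _⟩, rfl⟩ := hc
  exact ⟨j, (PySem.List.mem_pyRange_one.mp hj).1, (PySem.List.mem_pyRange_one.mp hj).2, rfl⟩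

theorem pvKids_bounds (base digits p lo : Int) (hb : 2 ≤ base)
    (hp : lo ≤ p ∧ p < lo * base) :
    ∀ c ∈ pvKids base digits p, lo * base ≤ c ∧ c < (lo * base) * base := by
  intro c hc
  obtain ⟨j, hj0, hjb, rfl⟩ := mem_pvKids hc
  constructor
  · nlinarith [hp.1]
  · nlinarith [hp.2]

theorem pvKids_pairwise (base digits p : Int) :
    (pvKids base digits p).Pairwise (· < ·) := by
  exact List.Pairwise.map _ (fun a b h => by omega)
    ((PySem.List.pairwise_lt_pyRange_one 0 base).filter _)

theorem pvKids_cross (base digits p q : Int) (hb : 2 ≤ base) (hpq : p < q) :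
    ∀ x ∈ pvKids base digits p, ∀ y ∈ pvKids base digits q, x < y := by
  intro x hx y hy
  obtain ⟨j, hj0, hjb, rfl⟩ := mem_pvKids hx
  obtain ⟨k, hk0, hkb, rfl⟩ := mem_pvKids hy
  nlinarith

theorem aLoop_sorted (base : Int) (hb : 2 ≤ base) :
    ∀ (f : Nat) (previous : List Int) (digits lo : Int), 0 < lo →
      (∀ p ∈ previous, lo ≤ p ∧ p < lo * base) → previous.Pairwise (· < ·) →
      (aLoop base f [] previous digits).Pairwise (· < ·) ∧
        ∀ x ∈ aLoop base f [] previous digits, lo ≤ x := by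
  intro f
  induction f with
  | zero => intro previous digits lo _ _ _; simp [aLoop]
  | succ f ih =>
    intro previous digits lo hlo hbnd hpw
    by_cases h : previous = []
    · simp [aLoop, h]
    · rw [show aLoop base (f+1) [] previous digits
          = aLoop base f previous (aInner base digits previous) (digits+1) from by simp [aLoop, h],
        aLoop_acc, aInner_eq]
      set C := previous.flatMap (pvKids base digits) with hC
      have hCbnd : ∀ c ∈ C, lo * base ≤ c ∧ c < (lo * base) * base := by
        intro c hc
        rw [hC, List.mem_flatMap] at hc
        obtain ⟨p, hpmem, hc⟩ := hc
        exact pvKids_bounds base digits p lo hb (hbnd p hpmem) c hc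
      have hCpw : C.Pairwise (· < ·) := by
        rw [hC, List.pairwise_flatMap]
        refine ⟨fun p _ => pvKids_pairwise base digits p, ?_⟩
        exact hpw.imp_of_mem (fun {p q} hpmem hqmem hpq => pvKids_cross base digits p q hb hpq)
      have hrec := ih C (digits+1) (lo*base) (by positivity) hCbnd hCpw
      constructor
      · rw [List.pairwise_append]
        refine ⟨hpw, hrec.1, fun x hx y hy => ?_⟩
        exact lt_of_lt_of_le (hbnd x hx).2 (hrec.2 y hy)
      · intro x hx
        rcases List.mem_append.mp hx with hx | hx
        · exact (hbnd x hx).1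
        · have := hrec.2 x hx
          nlinarith

-- ===== VERDICT (by name: the statement is the Claim_ definition above) =====
theorem find_polydivisible_spec : Claim_equal_find_polydivisible := by
  intro base _
  unfold Spec_find_polydivisible find_polydivisible find_polydivisible_alt
  by_cases hb : 2 ≤ base
  · symm
    apply PySem.List.sorted_eq_of_perm_of_pairwise_lt
    · exact aLoop_perm_dfs base (2^64) (PySem.List.pyRange 1 base 1) 2
    · refine (aLoop_sorted base hb (2^64) _ 2 1 one_pos (fun p hp => ?_)
        (PySem.List.pairwise_lt_pyRange_one 1 base)).1
      have := PySem.List.mem_pyRange_one.mp hp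
      omega
  · have hnil : PySem.List.pyRange 1 base 1 = [] := PySem.List.pyRange_one_eq_nil (by omega)
    rw [hnil]
    have hz : ∀ f : Nat, aLoop base f [] [] 2 = [] := by intro f; cases f <;> simp [aLoop]
    simp [hz, PySem.List.sorted]
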